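-- pv_equiv track=rewrite | github.com/ArthurAllilaire/BIO | 2017/p_2017_q1.py | before
-- ===== SOURCE A (Python) =====
-- def before(row, results, curr=""):
--     if len(row) == 0:
--         results.add(curr)
--         return results
--     colors = ['R','G', 'B']
--     if curr:
--         char, row = row[0], row[1:]
--         char2 = curr[-1]
--         if char == char2:
--             return before(row, results, curr+char)
--         else:
--             colors.remove(char)
--             colors.remove(char2)
--             return before(row, results, curr+colors[0])
--     else:
--         for c in colors:
--             results.update(before(row, results, c))
--         return results
-- ===== SOURCE B (Python) =====
-- def before(row, results, curr=""):
--     # Iterative re-implementation: one pass over row per seed prefix,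
--     # tracking only the last placed color. Mutates and returns `results`
--     # like the original.
--     if len(row) == 0:
--         results.add(curr)
--         return results
--     prefixes = [curr] if curr else ['R', 'G', 'B']
--     for prefix in prefixes:
--         s = prefix
--         last = prefix[-1]
--         for ch in row:
--             if ch == last:
--                 s += ch
--             else:
--                 third = [c for c in 'RGB' if c != ch and c != last]
--                 if len(third) != 1:
--                     raise ValueError("invalid color symbol")
--                 last = third[0]
--                 s += last
--         results.add(s)
--     return results
-- ===== Notes on version B (the rewrite author's own statement) =====
-- stated objective: faster
-- what changed: Replaces A's recursion (which rebuilds the whole color list per character, threads the result set through recursive calls plus a redundant set.update, and re-copies the growing prefix string on every step) with a flat iterative scan: for each seed prefix, one loop over row tracking only the last placed color and extending the string in place.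
import Mathlib
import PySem

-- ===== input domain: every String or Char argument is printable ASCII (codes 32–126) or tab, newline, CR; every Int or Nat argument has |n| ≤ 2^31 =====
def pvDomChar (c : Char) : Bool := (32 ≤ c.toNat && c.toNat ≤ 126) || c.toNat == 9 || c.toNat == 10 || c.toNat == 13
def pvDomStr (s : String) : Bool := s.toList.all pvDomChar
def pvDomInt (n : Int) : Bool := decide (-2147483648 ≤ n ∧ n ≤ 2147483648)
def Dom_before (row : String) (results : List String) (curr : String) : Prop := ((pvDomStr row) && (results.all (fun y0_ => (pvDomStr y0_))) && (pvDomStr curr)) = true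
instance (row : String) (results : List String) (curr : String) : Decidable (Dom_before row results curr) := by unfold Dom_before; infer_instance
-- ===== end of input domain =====

-- B replaces A's recursion (fresh curr+char string per step) with a flat per-seed iterative scan
-- tracking only the last color (measured faster in a timing run);
-- in Python both versions mutate the `results` set in place (this file is about the return value).

-- ===== PORT A =====
-- literal port of A on char lists; where Python's list.remove / indexing would raise
-- (excluded by Pre_before) the PySem primitives return none and a default is taken.
def beforeL : List Char → List String → List Char → List String
  | [], res, curr => PySem.Set.add res (String.ofList curr)
  | ch :: rest, res, curr =>
    if hC : curr ≠ [] then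
      -- char2 = curr[-1]
      let c2 := curr.getLastD ' '
      if ch = c2 then beforeL rest res (curr ++ [ch])
      else
        let colors := (PySem.List.remove? ['R', 'G', 'B'] ch).getD []
        let colors := (PySem.List.remove? colors c2).getD []
        beforeL rest res (curr ++ [(PySem.List.pyGet? colors 0).getD ' '])
    else
      ['R', 'G', 'B'].foldl
        (fun r c =>
          let r' := beforeL (ch :: rest) r [c]
          -- results.update(before(row, results, c)): before returns the same (mutated) set,
          -- so the update re-adds r''s own elements into r'
          List.foldl PySem.Set.add r' r') res
  termination_by row _ curr => (row.length, if curr = [] then 1 else 0)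
  decreasing_by
  · simp_wf; omega
  · simp_wf; omega
  · simp_wf
    have h0 : curr = [] := by simpa using hC
    simp only [h0]
    exact Prod.Lex.right _ (by decide)

def before (row : String) (results : List String) (curr : String) : List String :=
  beforeL row.toList results curr.toList

-- ===== PORT B =====
-- the third color (Python: [c for c in 'RGB' if c != ch and c != last])
def thirdOf (ch last : Char) : List Char :=
  ['R', 'G', 'B'].filter (fun c => c ≠ ch ∧ c ≠ last)

-- inner loop of B: scan row, appending while tracking the last placed color
def buildRow : List Char → List Char → Char → List Char
  | [], s, _ => s
  | ch :: rest, s, last =>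
    if ch = last then buildRow rest (s ++ [ch]) last
    else
      let l := (thirdOf ch last).headD ' '   -- Python B raises here if not exactly 1 candidate (outside Pre_)
      buildRow rest (s ++ [l]) l

def before_alt (row : String) (results : List String) (curr : String) : List String :=
  if row.toList = [] then PySem.Set.add results curr
  else
    let prefixes := if curr.toList = [] then [['R'], ['G'], ['B']] else [curr.toList]
    prefixes.foldl
      (fun r p => PySem.Set.add r (String.ofList (buildRow row.toList p (p.getLastD ' ')))) results

-- ===== PRECONDITION & SPEC =====
-- Pre_before holds exactly where Python A returns: A raises ValueError (list.remove)
-- unless row is empty, or every row char is in {R,G,B} (when curr is empty or ends in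
-- an RGB color), or every row char equals curr's last char (when that char is arbitrary).
def Pre_before (row : String) (results : List String) (curr : String) : Prop :=
  row.toList = [] ∨
  ((curr.toList = [] ∨ curr.toList.getLastD ' ' ∈ (['R', 'G', 'B'] : List Char)) ∧
     ∀ c ∈ row.toList, c ∈ (['R', 'G', 'B'] : List Char)) ∨
  (curr.toList ≠ [] ∧ ∀ c ∈ row.toList, c = curr.toList.getLastD ' ')
instance (row : String) (results : List String) (curr : String) : Decidable (Pre_before row results curr) := by unfold Pre_before; infer_instance

def pvWitness_before : String × List String × String := ("", [], "")

def Spec_before (row : String) (results : List String) (curr : String) (out : List String) : Prop := out = before_alt row results curr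
instance (row : String) (results : List String) (curr : String) (out : List String) : Decidable (Spec_before row results curr out) := by unfold Spec_before; infer_instance

-- ===== CLAIM (what is proved, stated in full; the proofs are below) =====
def Claim_equal_before : Prop := ∀ (row : String) (results : List String) (curr : String), Dom_before row results curr → Pre_before row results curr → Spec_before row results curr (before row results curr)

-- ===== LEMMAS AND PROOFS =====

-- adding elements that are already present is a no-op
theorem foldl_add_self_sub (l s : List String) (h : ∀ x ∈ l, x ∈ s) :
    List.foldl PySem.Set.add s l = s := by
  induction l with
  | nil => rfl
  | cons a t ih =>
    have ha : PySem.Set.add s a = s := by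
      simp [PySem.Set.add, PySem.Set.contains, h a (by simp)]
    simp only [List.foldl_cons, ha]
    exact ih fun x hx => h x (by simp [hx])

-- main invariant: with a nonempty accumulator whose last char is l, A's recursion
-- adds exactly the string B's scan builds
theorem beforeL_eq_build (row : List Char) (res : List String) (curr : List Char) (l : Char)
    (hne : curr ≠ []) (hl : curr.getLastD ' ' = l)
    (hp : (l ∈ (['R', 'G', 'B'] : List Char) ∧ ∀ c ∈ row, c ∈ (['R', 'G', 'B'] : List Char)) ∨
          (∀ c ∈ row, c = l)) :
    beforeL row res curr = PySem.Set.add res (String.ofList (buildRow row curr l)) := by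
  induction row generalizing res curr l with
  | nil => simp [beforeL, buildRow]
  | cons ch rest ih =>
    have hl' : curr.getLast?.getD ' ' = l := by
      rw [← List.getLastD_eq_getLast?]; exact hl
    by_cases hch : ch = l
    · subst hch
      have hrec : beforeL (ch :: rest) res curr = beforeL rest res (curr ++ [ch]) := by
        rw [beforeL]; simp [hne, hl']
      have hlast : (curr ++ [ch]).getLastD ' ' = ch := by simp
      rw [hrec, buildRow, if_pos rfl]
      refine ih res (curr ++ [ch]) ch (by simp) hlast ?_
      rcases hp with ⟨h1, h2⟩ | h2
      · exact Or.inl ⟨h1, fun c hc => h2 c (by simp [hc])⟩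
      · exact Or.inr fun c hc => h2 c (by simp [hc])
    · -- mismatch: both symbols must be RGB colors
      rcases hp with ⟨h1, h2⟩ | h2
      · have hchR : ch ∈ (['R', 'G', 'B'] : List Char) := h2 ch (by simp)
        have hrestR : ∀ c ∈ rest, c ∈ (['R', 'G', 'B'] : List Char) :=
          fun c hc => h2 c (by simp [hc])
        -- the appended char is the same concrete third color on both sides
        have key : ((PySem.List.pyGet? ((PySem.List.remove?
              ((PySem.List.remove? ['R', 'G', 'B'] ch).getD []) l).getD []) 0).getD ' ')
            = (thirdOf ch l).headD ' ' ∧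
            (thirdOf ch l).headD ' ' ∈ (['R', 'G', 'B'] : List Char) := by
          fin_cases hchR <;> fin_cases h1 <;>
            first
              | exact absurd rfl hch
              | constructor <;> decide
        obtain ⟨ht1, ht2⟩ := key
        have hrec : beforeL (ch :: rest) res curr
            = beforeL rest res (curr ++ [(thirdOf ch l).headD ' ']) := by
          rw [beforeL]; simp [hne, hl', hch, ht1]
        have hlast : (curr ++ [(thirdOf ch l).headD ' ']).getLastD ' ' = (thirdOf ch l).headD ' ' := by
          simp
        rw [hrec, buildRow]
        simp only [if_neg hch]
        exact ih res (curr ++ [(thirdOf ch l).headD ' ']) _ (by simp) hlast (Or.inl ⟨ht2, hrestR⟩)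
      · exact absurd (h2 ch (by simp)) hch

-- collapsing results.update(results)
theorem foldl_add_self (s : List String) : List.foldl PySem.Set.add s s = s :=
  foldl_add_self_sub s s (fun _ h => h)

-- ===== VERDICT (by name: the statement is the Claim_ definition above) =====
theorem before_spec : Claim_equal_before := by
  intro row results curr _ hpre
  unfold Spec_before before before_alt
  by_cases hrow : row.toList = []
  · rw [hrow]; simp [beforeL]
  · rw [if_neg hrow]
    by_cases hcur : curr.toList = []
    · -- seed branch: Pre must be the all-RGB case
      have hR : ∀ c ∈ row.toList, c ∈ (['R', 'G', 'B'] : List Char) := by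
        rcases hpre with h | ⟨_, h⟩ | ⟨h, _⟩
        · exact absurd h hrow
        · exact h
        · exact absurd hcur h
      obtain ⟨ch, rest, hrow'⟩ := List.exists_cons_of_ne_nil hrow
      rw [hrow'] at hR
      have h1 : ∀ r, beforeL (ch :: rest) r ['R']
          = PySem.Set.add r (String.ofList (buildRow (ch :: rest) ['R'] 'R')) :=
        fun r => beforeL_eq_build _ r ['R'] 'R' (by simp) (by simp) (Or.inl ⟨by simp, hR⟩)
      have h2 : ∀ r, beforeL (ch :: rest) r ['G']
          = PySem.Set.add r (String.ofList (buildRow (ch :: rest) ['G'] 'G')) :=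
        fun r => beforeL_eq_build _ r ['G'] 'G' (by simp) (by simp) (Or.inl ⟨by simp, hR⟩)
      have h3 : ∀ r, beforeL (ch :: rest) r ['B']
          = PySem.Set.add r (String.ofList (buildRow (ch :: rest) ['B'] 'B')) :=
        fun r => beforeL_eq_build _ r ['B'] 'B' (by simp) (by simp) (Or.inl ⟨by simp, hR⟩)
      rw [hrow', hcur, if_pos rfl]
      rw [beforeL, dif_neg (by simp)]
      simp only [List.foldl_cons, List.foldl_nil, h1, h2, h3, foldl_add_self,
        List.getLastD]
      rfl
    · -- nonempty curr: one build starting from curr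
      have hp : ((curr.toList.getLastD ' ') ∈ (['R', 'G', 'B'] : List Char) ∧
            ∀ c ∈ row.toList, c ∈ (['R', 'G', 'B'] : List Char)) ∨
          (∀ c ∈ row.toList, c = curr.toList.getLastD ' ') := by
        rcases hpre with h | ⟨hc, h⟩ | ⟨_, h⟩
        · exact absurd h hrow
        · rcases hc with hc | hc
          · exact absurd hc hcur
          · exact Or.inl ⟨hc, h⟩
        · exact Or.inr h
      rw [if_neg hcur]
      simp only [List.foldl_cons, List.foldl_nil]
      exact beforeL_eq_build row.toList results curr.toList _ hcur rfl hp
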